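-- pv_equiv track=rewrite | github.com/revacholiere/openvla-oft | skip.py | build_contiguous_skip_ranges
-- ===== SOURCE A (Python) =====
-- from typing import Any, Dict, List, Optional, Set, Tuple
--
-- def _build_contiguous_segments(layer_indices: List[int]) -> List[List[int]]:
--     """Split sorted indices into contiguous segments in index space."""
--     if not layer_indices:
--         return []
--
--     segments: List[List[int]] = []
--     current_segment: List[int] = [layer_indices[0]]
--     for idx in layer_indices[1:]:
--         if idx == current_segment[-1] + 1:
--             current_segment.append(idx)
--         else:
--             segments.append(current_segment)
--             current_segment = [idx]
--     segments.append(current_segment)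
--     return segments
--
-- def build_contiguous_skip_ranges(searchable_layers: List[int], max_skip_layers: int) -> List[Tuple[int, int]]:
--     """
--     Build all contiguous layer ranges [start, end] inside searchable layers.
--
--     Contiguity is defined in model index space (e.g. 5-7 is contiguous; 5-7 and 9-10 are separate segments).
--     """
--     ranges: List[Tuple[int, int]] = []
--     for segment in _build_contiguous_segments(searchable_layers):
--         seg_len = len(segment)
--         for start_pos in range(seg_len):
--             max_end_pos = min(seg_len - 1, start_pos + max_skip_layers - 1)
--             for end_pos in range(start_pos, max_end_pos + 1):
--                 ranges.append((segment[start_pos], segment[end_pos]))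
--     return ranges
-- ===== SOURCE B (Python) =====
-- def build_contiguous_skip_ranges(searchable_layers, max_skip_layers):
--     res = []
--     n = len(searchable_layers)
--     for i in range(n):
--         x = searchable_layers[i]
--         j = i
--         while j < n and j - i < max_skip_layers and searchable_layers[j] == x + (j - i):
--             res.append((x, searchable_layers[j]))
--             j += 1
--     return res
-- ===== Notes on version B (the rewrite author's own statement) =====
-- stated objective: simpler
-- what changed: B drops the _build_contiguous_segments helper and the materialized segment lists entirely: a single pass walks, for each start index i, an inner index j forward while values stay contiguous (a[j] == a[i] + (j-i)) and j-i stays below max_skip_layers, emitting (a[i], a[j]) pairs directly in the same order.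
import Mathlib
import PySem

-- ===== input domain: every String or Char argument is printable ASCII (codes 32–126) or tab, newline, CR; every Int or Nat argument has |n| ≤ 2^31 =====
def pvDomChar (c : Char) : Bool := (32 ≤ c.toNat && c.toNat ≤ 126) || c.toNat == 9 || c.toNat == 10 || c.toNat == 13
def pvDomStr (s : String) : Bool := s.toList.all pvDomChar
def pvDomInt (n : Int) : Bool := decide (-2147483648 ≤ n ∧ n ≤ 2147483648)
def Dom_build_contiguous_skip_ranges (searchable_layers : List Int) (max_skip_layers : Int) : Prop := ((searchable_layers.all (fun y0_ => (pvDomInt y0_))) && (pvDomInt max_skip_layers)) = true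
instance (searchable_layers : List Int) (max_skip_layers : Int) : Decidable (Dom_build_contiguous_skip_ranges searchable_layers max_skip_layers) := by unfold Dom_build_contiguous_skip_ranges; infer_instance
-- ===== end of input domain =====

-- B fuses A's two phases (segment materialization, then per-segment triple loop) into one pass:
-- for each start index it walks forward while values stay contiguous and under the skip cap. Same output, no segment lists.

-- ===== PORT A =====
-- _build_contiguous_segments: fold over the tail, state (segments, current_segment); list indices via pyGetD (always in range here)
def pvSegsA (layer_indices : List Int) : List (List Int) :=
  match layer_indices with
  | [] => []
  | h :: t =>
    let st := t.foldl (fun (st : List (List Int) × List Int) idx =>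
      if idx = PySem.List.pyGetD st.2 (-1) 0 + 1 then (st.1, st.2 ++ [idx])
      else (st.1 ++ [st.2], [idx])) (([] : List (List Int)), [h])
    st.1 ++ [st.2]

def build_contiguous_skip_ranges (searchable_layers : List Int) (max_skip_layers : Int) : List (Int × Int) :=
  (pvSegsA searchable_layers).foldl (fun ranges seg =>
    let seg_len : Int := seg.length
    (PySem.List.pyRange 0 seg_len 1).foldl (fun r start_pos =>
      let max_end_pos := min (seg_len - 1) (start_pos + max_skip_layers - 1)
      (PySem.List.pyRange start_pos (max_end_pos + 1) 1).foldl (fun r2 end_pos =>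
        r2 ++ [(PySem.List.pyGetD seg start_pos 0, PySem.List.pyGetD seg end_pos 0)]) r) ranges) []

-- ===== PORT B =====
-- inner while loop of B: walk j forward from i while in range, under the cap, and contiguous with a[i]
def pvAltInner (a : List Int) (m : Int) (x : Int) (i j : Nat) : List (Int × Int) :=
  if _h : j < a.length then
    if ((j : Int) - (i : Int) < m) ∧ (PySem.List.pyGetD a (j : Int) 0 = x + ((j : Int) - (i : Int))) then
      (x, PySem.List.pyGetD a (j : Int) 0) :: pvAltInner a m x i (j + 1)
    else []
  else []
termination_by a.length - j

def build_contiguous_skip_ranges_alt (searchable_layers : List Int) (max_skip_layers : Int) : List (Int × Int) :=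
  (List.range searchable_layers.length).foldl
    (fun res (i : Nat) => res ++ pvAltInner searchable_layers max_skip_layers (PySem.List.pyGetD searchable_layers (i : Int) 0) i i) []

-- ===== PRECONDITION & SPEC =====
def Spec_build_contiguous_skip_ranges (searchable_layers : List Int) (max_skip_layers : Int) (out : List (Int × Int)) : Prop := out = build_contiguous_skip_ranges_alt searchable_layers max_skip_layers
instance (searchable_layers : List Int) (max_skip_layers : Int) (out : List (Int × Int)) : Decidable (Spec_build_contiguous_skip_ranges searchable_layers max_skip_layers out) := by unfold Spec_build_contiguous_skip_ranges; infer_instance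

-- ===== CLAIM (what is proved, stated in full; the proofs are below) =====
def Claim_equal_build_contiguous_skip_ranges : Prop := ∀ (searchable_layers : List Int) (max_skip_layers : Int), Dom_build_contiguous_skip_ranges searchable_layers max_skip_layers → Spec_build_contiguous_skip_ranges searchable_layers max_skip_layers (build_contiguous_skip_ranges searchable_layers max_skip_layers)

-- ===== LEMMAS AND PROOFS =====

-- structural reference for A's segment splitter: (maximal +1-run following x, rest)
def pvRun (x : Int) : List Int → List Int × List Int
  | [] => ([], [])
  | y :: t => if y = x + 1 then (y :: (pvRun y t).1, (pvRun y t).2) else ([], y :: t)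

theorem pvRun_fst_snd (x : Int) (t : List Int) : (pvRun x t).1 ++ (pvRun x t).2 = t := by
  induction t generalizing x with
  | nil => simp [pvRun]
  | cons y t ih => by_cases h : y = x + 1 <;> simp [pvRun, h, ih]

theorem pvRun_snd_length (x : Int) (t : List Int) : (pvRun x t).2.length ≤ t.length := by
  have := congrArg List.length (pvRun_fst_snd x t)
  simp at this; omega

def pvSplit : List Int → List (List Int)
  | [] => []
  | h :: t => (h :: (pvRun h t).1) :: pvSplit (pvRun h t).2
termination_by l => l.length
decreasing_by simp; have := pvRun_snd_length h t; omega

-- the closed-form pair list both programs emit for start index i of a segment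
def pvClosed (x m len i : Int) : List (Int × Int) :=
  (PySem.List.pyRange i (min len (i + m)) 1).map (fun e => (x, x + (e - i)))

def pvSegClosed (m : Int) (seg : List Int) : List (Int × Int) :=
  (List.range seg.length).flatMap (fun i => pvClosed (seg.getD i 0) m seg.length i)

theorem pvRun_chain (t : List Int) (x : Int) :
    (x :: (pvRun x t).1).IsChain (fun p q => q = p + 1) := by
  induction t generalizing x with
  | nil => simp [pvRun]
  | cons y t ih =>
    by_cases h : y = x + 1
    · subst h
      simp only [pvRun, if_true, List.isChain_cons_cons]
      exact ⟨trivial, ih (x+1)⟩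
    · simp [pvRun, h]

theorem pvRun_boundary (t : List Int) (x : Int) (h : (pvRun x t).2 ≠ []) :
    (pvRun x t).2.getD 0 0 ≠ x + ((pvRun x t).1.length : Int) + 1 := by
  induction t generalizing x with
  | nil => simp [pvRun] at h
  | cons y t ih =>
    by_cases hy : y = x + 1
    · subst hy
      have := ih (x+1) (by simpa [pvRun] using h)
      simp only [pvRun, if_true, List.length_cons]
      push_cast
      intro hc; apply this; linarith
    · simp [pvRun, hy]

theorem pvChain_getD (s : List Int) (hs : s.IsChain (fun p q => q = p + 1))
    (i j : Nat) (hij : i ≤ j) (hj : j < s.length) :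
    s.getD j 0 = s.getD i 0 + ((j : Int) - (i : Int)) := by
  rw [List.isChain_iff_getElem] at hs
  induction j, hij using Nat.le_induction with
  | base => simp
  | succ j hij ih =>
    have hj' : j < s.length := by omega
    have h1 : s.getD (j+1) 0 = s[j] + 1 := by
      rw [List.getD_eq_getElem _ _ hj]; exact hs j (by omega)
    have h2 : s.getD j 0 = s[j] := List.getD_eq_getElem _ _ hj'
    rw [h1, ← h2, ih hj']
    push_cast; ring

theorem pvInner_closed (s r : List Int) (m : Int) (i : Nat)
    (hs : s.IsChain (fun p q => q = p + 1))
    (hb : r ≠ [] → r.getD 0 0 ≠ s.getD 0 0 + (s.length : Int))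
    (hik : i < s.length) : ∀ (j : Nat), i ≤ j → j ≤ s.length →
    pvAltInner (s ++ r) m (s.getD i 0) i j =
      (PySem.List.pyRange (j : Int) (min (s.length : Int) ((i : Int) + m)) 1).map
        (fun e => (s.getD i 0, s.getD i 0 + (e - (i : Int)))) := by
  have stop : ∀ (j : Nat), i ≤ j → j ≤ s.length → ¬ ((j : Int) < min (s.length : Int) ((i : Int) + m)) →
      pvAltInner (s ++ r) m (s.getD i 0) i j = [] := by
    intro j hij hjk hstop
    conv_lhs => rw [pvAltInner]
    by_cases h1 : j < (s ++ r).length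
    · rw [dif_pos h1, if_neg]
      intro ⟨hc1, hc2⟩
      have hj : j = s.length := by omega
      have hr : r ≠ [] := by
        intro h; subst h; simp at h1; omega
      apply hb hr
      have hg : PySem.List.pyGetD (s ++ r) ((j : Nat) : Int) 0 = r.getD 0 0 := by
        rw [PySem.List.pyGetD_natCast]
        subst hj
        simp [List.getD, List.getElem?_append_right]
      have hiv : s.getD i 0 = s.getD 0 0 + ((i : Int) - 0) := pvChain_getD s hs 0 i (by omega) hik
      rw [hg] at hc2
      rw [hc2, hiv, hj]
      ring
    · rw [dif_neg h1]
  suffices H : ∀ (n : Nat), ∀ (j : Nat), i ≤ j → j ≤ s.length → s.length - j ≤ n →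
      pvAltInner (s ++ r) m (s.getD i 0) i j =
      (PySem.List.pyRange (j : Int) (min (s.length : Int) ((i : Int) + m)) 1).map
        (fun e => (s.getD i 0, s.getD i 0 + (e - (i : Int)))) by
    intro j h1 h2; exact H s.length j h1 h2 (by omega)
  intro n
  induction n with
  | zero =>
    intro j hij hjk hn
    have hj : j = s.length := by omega
    rw [stop j hij hjk (by omega), PySem.List.pyRange_one_eq_nil (by omega)]
    simp
  | succ n ih =>
    intro j hij hjk hn
    by_cases hgo : (j : Int) < min (s.length : Int) ((i : Int) + m)
    · have hjs : j < s.length := by omega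
      conv_lhs => rw [pvAltInner]
      rw [dif_pos (by simp; omega)]
      have hg : PySem.List.pyGetD (s ++ r) ((j : Nat) : Int) 0 = s.getD j 0 := by
        rw [PySem.List.pyGetD_natCast]
        simp [List.getD, List.getElem?_append_left hjs]
      rw [if_pos ⟨by omega, by rw [hg]; exact pvChain_getD s hs i j hij hjs⟩]
      rw [PySem.List.pyRange_one_cons hgo]
      rw [List.map_cons, hg, pvChain_getD s hs i j hij hjs]
      have hcast : ((j : Int) + 1) = ((j + 1 : Nat) : Int) := by push_cast; ring
      rw [hcast, ← ih (j+1) (by omega) (by omega) (by omega)]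
    · rw [stop j hij hjk hgo, PySem.List.pyRange_one_eq_nil (by omega)]
      simp

theorem pvInner_shift (s r : List Int) (m x : Int) (u v : Nat) :
    pvAltInner (s ++ r) m x (s.length + u) (s.length + v) = pvAltInner r m x u v := by
  suffices H : ∀ n v, r.length - v ≤ n →
      pvAltInner (s ++ r) m x (s.length + u) (s.length + v) = pvAltInner r m x u v by
    exact H r.length v (by omega)
  intro n
  induction n with
  | zero =>
    intro v hv
    conv_lhs => rw [pvAltInner]
    conv_rhs => rw [pvAltInner]
    rw [dif_neg (by simp; omega), dif_neg (by omega)]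
  | succ n ih =>
    intro v hv
    by_cases hlt : v < r.length
    · conv_lhs => rw [pvAltInner]
      conv_rhs => rw [pvAltInner]
      rw [dif_pos (by simp; omega), dif_pos hlt]
      have hidx : PySem.List.pyGetD (s ++ r) ((s.length + v : Nat) : Int) 0 = PySem.List.pyGetD r ((v : Nat) : Int) 0 := by
        rw [PySem.List.pyGetD_natCast, PySem.List.pyGetD_natCast]
        simp [List.getD, List.getElem?_append_right]
      have harith : ((s.length + v : Nat) : Int) - ((s.length + u : Nat) : Int) = (v : Int) - (u : Int) := by
        push_cast; ring
      rw [hidx, harith]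
      split_ifs with hc
      · have : s.length + v + 1 = s.length + (v + 1) := by omega
        rw [this, ih (v+1) (by omega)]
      · rfl
    · conv_lhs => rw [pvAltInner]
      conv_rhs => rw [pvAltInner]
      rw [dif_neg (by simp; omega), dif_neg (by omega)]

theorem pvA_flat (a : List Int) (m : Int) :
    build_contiguous_skip_ranges a m = (pvSegsA a).flatMap (fun seg =>
      (PySem.List.pyRange 0 (seg.length : Int) 1).flatMap (fun s' =>
        (PySem.List.pyRange s' (min ((seg.length : Int) - 1) (s' + m - 1) + 1) 1).map
          (fun e => (PySem.List.pyGetD seg s' 0, PySem.List.pyGetD seg e 0)))) := by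
  simp only [build_contiguous_skip_ranges, PySem.List.foldl_append_singleton_eq_map,
    PySem.List.foldl_append_eq_flatMap]
  exact List.nil_append _

theorem pvB_flat (a : List Int) (m : Int) :
    build_contiguous_skip_ranges_alt a m = (List.range a.length).flatMap
      (fun i : Nat => pvAltInner a m (PySem.List.pyGetD a (i : Int) 0) i i) := by
  simp only [build_contiguous_skip_ranges_alt]
  rw [PySem.List.foldl_append_eq_flatMap]
  simp

theorem pvSegA_closed (seg : List Int) (m : Int)
    (hs : seg.IsChain (fun p q => q = p + 1)) :
    (PySem.List.pyRange 0 (seg.length : Int) 1).flatMap (fun s' =>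
      (PySem.List.pyRange s' (min ((seg.length : Int) - 1) (s' + m - 1) + 1) 1).map
        (fun e => (PySem.List.pyGetD seg s' 0, PySem.List.pyGetD seg e 0))) = pvSegClosed m seg := by
  rw [PySem.List.pyRange_zero_nat seg.length, List.flatMap_map]
  apply List.flatMap_congr
  intro i hi
  have hilen : i < seg.length := List.mem_range.mp hi
  have hmin : min ((seg.length : Int) - 1) ((i : Int) + m - 1) + 1 = min (seg.length : Int) ((i : Int) + m) := by
    omega
  rw [hmin, PySem.List.pyGetD_natCast]
  unfold pvClosed
  apply List.map_congr_left
  intro e he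
  rcases (PySem.List.mem_pyRange_one).mp he with ⟨he1, he2⟩
  have h0e : (0 : Int) ≤ e := by omega
  have helen : e < (seg.length : Int) := by omega
  have hcast : ((e.toNat : Nat) : Int) = e := Int.toNat_of_nonneg h0e
  have hg : PySem.List.pyGetD seg e 0 = seg.getD e.toNat 0 := by
    rw [← hcast, PySem.List.pyGetD_natCast]
    simp [Int.toNat_of_nonneg h0e]
  rw [hg, pvChain_getD seg hs i e.toNat (by omega) (by omega), hcast]

theorem pvFold_split (t : List Int) : ∀ (segs : List (List Int)) (cur : List Int) (x : Int),
    PySem.List.pyGetD cur (-1) 0 = x →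
    ((t.foldl (fun (st : List (List Int) × List Int) idx =>
      if idx = PySem.List.pyGetD st.2 (-1) 0 + 1 then (st.1, st.2 ++ [idx])
      else (st.1 ++ [st.2], [idx])) (segs, cur)).1 ++
     [(t.foldl (fun (st : List (List Int) × List Int) idx =>
      if idx = PySem.List.pyGetD st.2 (-1) 0 + 1 then (st.1, st.2 ++ [idx])
      else (st.1 ++ [st.2], [idx])) (segs, cur)).2]) =
    segs ++ [cur ++ (pvRun x t).1] ++ pvSplit (pvRun x t).2 := by
  induction t with
  | nil => intro segs cur x hx; simp [pvRun, pvSplit]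
  | cons y t ih =>
    intro segs cur x hx
    by_cases hy : y = x + 1
    · subst hy
      simp only [List.foldl_cons, hx, if_true]
      rw [ih segs (cur ++ [x+1]) (x+1) (PySem.List.pyGetD_neg_one_append_singleton cur (x+1) 0)]
      simp only [pvRun, if_true]
      simp [List.append_assoc]
    · simp only [List.foldl_cons, hx, if_neg hy]
      rw [ih (segs ++ [cur]) [y] y (by simpa using PySem.List.pyGetD_neg_one_append_singleton [] y 0)]
      have hrun : pvRun x (y :: t) = ([], y :: t) := by simp [pvRun, hy]
      rw [hrun]
      conv_rhs => rw [pvSplit]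
      simp

theorem pvSegsA_eq_split (a : List Int) : pvSegsA a = pvSplit a := by
  cases a with
  | nil => simp [pvSegsA, pvSplit]
  | cons h t =>
    simp only [pvSegsA]
    rw [pvFold_split t [] [h] h (by simpa using PySem.List.pyGetD_neg_one_append_singleton [] h 0)]
    conv_rhs => rw [pvSplit]
    simp

theorem pvSplit_chain (a : List Int) : ∀ seg ∈ pvSplit a, seg.IsChain (fun p q => q = p + 1) := by
  induction a using pvSplit.induct with
  | case1 => simp [pvSplit]
  | case2 h t ih =>
    intro seg hseg
    rw [pvSplit] at hseg
    rcases List.mem_cons.mp hseg with h1 | h2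
    · subst h1; exact pvRun_chain t h
    · exact ih seg h2

theorem pvA_closed (a : List Int) (m : Int) :
    build_contiguous_skip_ranges a m = (pvSplit a).flatMap (pvSegClosed m) := by
  rw [pvA_flat, pvSegsA_eq_split]
  apply List.flatMap_congr
  intro seg hseg
  exact pvSegA_closed seg m (pvSplit_chain a seg hseg)

theorem pvB_closed (a : List Int) (m : Int) :
    build_contiguous_skip_ranges_alt a m = (pvSplit a).flatMap (pvSegClosed m) := by
  induction a using pvSplit.induct with
  | case1 => simp [build_contiguous_skip_ranges_alt, pvSplit]
  | case2 h t ih =>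
    rw [pvB_flat]
    have hsr : h :: t = (h :: (pvRun h t).1) ++ (pvRun h t).2 := by
      have h2 := pvRun_fst_snd h t
      rw [List.cons_append, h2]
    conv_rhs => rw [pvSplit]
    rw [hsr, List.length_append, List.range_add, List.flatMap_append, List.flatMap_map,
      List.flatMap_cons, ← ih]
    congr 1
    · apply List.flatMap_congr
      intro i hi
      have hilen : i < (h :: (pvRun h t).1).length := List.mem_range.mp hi
      have hg : PySem.List.pyGetD ((h :: (pvRun h t).1) ++ (pvRun h t).2) (i : Int) 0 =
          (h :: (pvRun h t).1).getD i 0 := by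
        rw [PySem.List.pyGetD_natCast]
        simp only [List.getD]
        rw [List.getElem?_append_left hilen]
      have hb : (pvRun h t).2 ≠ [] →
          (pvRun h t).2.getD 0 0 ≠ (h :: (pvRun h t).1).getD 0 0 + ((h :: (pvRun h t).1).length : Int) := by
        intro hne
        have := pvRun_boundary t h hne
        simp only [List.getD_cons_zero, List.length_cons]
        push_cast
        intro hc; apply this; linarith
      rw [hg, pvInner_closed (h :: (pvRun h t).1) (pvRun h t).2 m i
        (pvRun_chain t h) hb hilen i (le_refl i) (by omega)]
      rfl
    · rw [pvB_flat]
      apply List.flatMap_congr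
      intro u hu
      have hg : PySem.List.pyGetD ((h :: (pvRun h t).1) ++ (pvRun h t).2)
          (((h :: (pvRun h t).1).length + u : Nat) : Int) 0 =
          PySem.List.pyGetD (pvRun h t).2 (u : Int) 0 := by
        rw [PySem.List.pyGetD_natCast, PySem.List.pyGetD_natCast]
        simp only [List.getD]
        rw [List.getElem?_append_right (by omega)]
        have huu : (h :: (pvRun h t).1).length + u - (h :: (pvRun h t).1).length = u := by omega
        rw [huu]
      rw [hg, pvInner_shift]

-- ===== VERDICT (by name: the statement is the Claim_ definition above) =====
theorem build_contiguous_skip_ranges_spec : Claim_equal_build_contiguous_skip_ranges := by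
  intro a m _
  unfold Spec_build_contiguous_skip_ranges
  rw [pvA_closed, pvB_closed]
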